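-- pv_equiv track=rewrite | github.com/makemyway-kr/cote | programmers/python/kakao/lv3/bad_user.py | solution
-- ===== SOURCE A (Python) =====
-- from itertools import combinations, product
--
-- def solution(user_id, banned_id):
--     answer = []
--     idLength = {}
--     candidates = []
--     for i in user_id:
--         if len(i) not in idLength.keys():
--             idLength[len(i)] = [i]
--         else:
--             idLength[len(i)].append(i)
--     for b in banned_id:
--         temp = []
--         for c in idLength[len(b)]:
--             breaker = False
--             for i in range(len(b)):
--                 if (b[i] != c[i]) and (b[i] != '*'):
--                     breaker = True
--                     break
--             if breaker == False:
--                 temp.append(c)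
--         candidates.append(temp)
--     combi = list((product(*candidates)))
--     comparing = len(banned_id)
--     for c in combi:
--         if len(set(c)) == comparing and set(c) not in answer:
--             answer.append(set(c))
--     return len(answer)
-- ===== SOURCE B (Python) =====
-- def solution(user_id, banned_id):
--     idLength = {}
--     for u in user_id:
--         idLength.setdefault(len(u), []).append(u)
--     candidates = [[c for c in idLength[len(b)]
--                    if all(bc == '*' or bc == cc for bc, cc in zip(b, c))]
--                   for b in banned_id]
--     result = set()
--
--     def dfs(i, chosen):
--         if i == len(candidates):
--             result.add(tuple(sorted(chosen)))
--             return
--         for c in candidates[i]: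
--             if c not in chosen:
--                 chosen.append(c)
--                 dfs(i + 1, chosen)
--                 chosen.pop()
--
--     dfs(0, [])
--     return len(result)
-- ===== Notes on version B (the rewrite author's own statement) =====
-- stated objective: alternative
-- what changed: A materialises the full itertools.product of per-pattern candidate lists and then filters tuples by len(set)==n with a linear 'not in answer' dedup scan; B replaces that by a depth-first recursion over the patterns that skips already-chosen users (pruning repeated-user branches instead of generating them) and dedups by adding canonical sorted tuples to a hash set.
-- outside the precondition, e.g. on solution(['abc'], ['ab']): A raises KeyError, B raises KeyError
import Mathlib
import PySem

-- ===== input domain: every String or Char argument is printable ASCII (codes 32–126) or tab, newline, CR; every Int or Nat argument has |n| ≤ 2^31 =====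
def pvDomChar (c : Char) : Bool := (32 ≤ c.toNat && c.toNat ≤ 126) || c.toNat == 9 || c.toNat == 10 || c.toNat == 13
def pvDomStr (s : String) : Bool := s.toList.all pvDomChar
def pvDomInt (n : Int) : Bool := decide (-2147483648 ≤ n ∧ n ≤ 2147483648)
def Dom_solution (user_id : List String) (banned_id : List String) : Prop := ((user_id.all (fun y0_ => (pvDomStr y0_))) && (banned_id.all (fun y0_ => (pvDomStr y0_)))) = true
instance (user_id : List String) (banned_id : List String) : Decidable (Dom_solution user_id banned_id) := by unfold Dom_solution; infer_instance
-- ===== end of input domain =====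

-- B replaces A's full itertools.product materialisation + per-tuple set filtering by a
-- depth-first recursion over the banned patterns that skips already-chosen users and
-- collects canonical sorted tuples (objective: alternative algorithm, prunes instead of filtering).

-- ===== PORT A =====
-- A's inner 'for i in range(len(b)): … break' loop; after 'breaker = True' the body does
-- nothing more, so carrying the flag over the remaining indices is the same computation.
def solBreaker (bl cl : List Char) : Bool :=
  (PySem.List.pyRange 0 bl.length 1).foldl
    (fun breaker i =>
      if (PySem.List.pyGetD bl i ' ' != PySem.List.pyGetD cl i ' ' &&
          PySem.List.pyGetD bl i ' ' != '*') then true else breaker)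
    false

def solIdLength (user_id : List String) : PySem.Dict Int (List String) :=
  user_id.foldl
    (fun d u =>
      if d.contains (u.toList.length : Int) = false
      then d.insert (u.toList.length : Int) [u]
      else d.modify (u.toList.length : Int) [] (fun l => l ++ [u]))
    PySem.Dict.empty

-- idLength[len(b)] raises KeyError in Python exactly when get? is none (excluded by Pre_);
-- the [] default is never consulted inside Pre_.
def solCandidates (user_id banned_id : List String) : List (List String) :=
  banned_id.foldl
    (fun cands b =>
      cands ++ [(((solIdLength user_id).get? (b.toList.length : Int)).getD []).foldl
        (fun temp c => if solBreaker b.toList c.toList = false then temp ++ [c] else temp) []])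
    []

def solution (user_id : List String) (banned_id : List String) : Int :=
  let candidates := solCandidates user_id banned_id
  -- list(product(*candidates)), by its documented equivalent 'result = [x+[y] …]' loop
  let combi := candidates.foldl (fun acc pool => acc.flatMap (fun t => pool.map (fun c => t ++ [c]))) [[]]
  let comparing : Int := banned_id.length
  let answer := combi.foldl
    (fun ans c =>
      if ((PySem.Set.ofList c).length : Int) = comparing ∧
         ans.any (fun s => PySem.Set.equal s (PySem.Set.ofList c)) = false
      then ans ++ [PySem.Set.ofList c] else ans)
    ([] : List (PySem.Set String))
  (answer.length : Int)

-- ===== PORT B =====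
def altMatch (bl cl : List Char) : Bool :=
  (bl.zip cl).all (fun p => p.1 == '*' || p.1 == p.2)

def altIdLength (user_id : List String) : PySem.Dict Int (List String) :=
  user_id.foldl (fun d u => d.modify (u.toList.length : Int) [] (fun l => l ++ [u])) PySem.Dict.empty

-- same KeyError spot as A: get? is none exactly where Python's idLength[len(b)] raises
def altCandidates (user_id banned_id : List String) : List (List String) :=
  banned_id.map (fun b =>
    (((altIdLength user_id).get? (b.toList.length : Int)).getD []).filter
      (fun c => altMatch b.toList c.toList))

def altDfs : List (List String) → List String → PySem.Set (List String) → PySem.Set (List String)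
  | [], chosen, res => res.add (PySem.List.sorted chosen (fun x => x))
  | pool :: rest, chosen, res =>
      pool.foldl (fun res c => if c ∈ chosen then res else altDfs rest (chosen ++ [c]) res) res

def solution_alt (user_id : List String) (banned_id : List String) : Int :=
  ((altDfs (altCandidates user_id banned_id) [] PySem.Set.empty).length : Int)

-- ===== PRECONDITION & SPEC =====
-- Pre_ excludes exactly the inputs where Python A raises KeyError (a banned pattern whose
-- length matches no user id); B raises there too.
def Pre_solution (user_id : List String) (banned_id : List String) : Prop :=
  ∀ b ∈ banned_id, ∃ u ∈ user_id, u.toList.length = b.toList.length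
instance (user_id : List String) (banned_id : List String) : Decidable (Pre_solution user_id banned_id) := by unfold Pre_solution; infer_instance

def pvWitness_solution : List String × List String := (["frodo", "abc123"], ["fr*d*", "*bc1*3"])

def Spec_solution (user_id : List String) (banned_id : List String) (out : Int) : Prop := out = solution_alt user_id banned_id
instance (user_id : List String) (banned_id : List String) (out : Int) : Decidable (Spec_solution user_id banned_id out) := by unfold Spec_solution; infer_instance

-- ===== CLAIM (what is proved, stated in full; the proofs are below) =====
def Claim_equal_solution : Prop := ∀ (user_id : List String) (banned_id : List String), Dom_solution user_id banned_id → Pre_solution user_id banned_id → Spec_solution user_id banned_id (solution user_id banned_id)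

-- ===== LEMMAS AND PROOFS =====

-- recursive cartesian product, proof-side reference shape for A's product loop
def recProd : List (List String) → List (List String)
  | [] => [[]]
  | pool :: rest => pool.flatMap (fun c => (recProd rest).map (fun t => c :: t))

lemma prodFold (cls : List (List String)) (acc : List (List String)) :
    cls.foldl (fun acc pool => acc.flatMap (fun t => pool.map (fun c => t ++ [c]))) acc
      = acc.flatMap (fun t => (recProd cls).map (fun s => t ++ s)) := by
  induction cls generalizing acc with
  | nil => simp [recProd]
  | cons pool rest ih =>
    simp only [List.foldl_cons, ih, recProd]
    simp only [List.flatMap_map, List.map_flatMap, List.flatMap_assoc]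
    congr 1; funext t
    induction pool with
    | nil => simp
    | cons p ps ihp => simp_all [List.flatMap_cons]

lemma length_mem_recProd {cls : List (List String)} {t : List String} (h : t ∈ recProd cls) :
    t.length = cls.length := by
  induction cls generalizing t with
  | nil => simp [recProd] at h; simp [h]
  | cons pool rest ih =>
    simp only [recProd, List.mem_flatMap, List.mem_map] at h
    obtain ⟨c, _, t', ht', rfl⟩ := h
    simp [ih ht']

lemma ofList_length_eq_iff (c : List String) :
    (PySem.Set.ofList c).length = c.length ↔ c.Nodup := by
  induction c using List.reverseRecOn with
  | nil => simp [PySem.Set.ofList]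
  | append_singleton xs x ih =>
    rw [PySem.Set.ofList_append_singleton, PySem.Set.add_eq_ite]
    by_cases hx : x ∈ PySem.Set.ofList xs
    · rw [if_pos hx]
      have hm : x ∈ xs := (PySem.Set.mem_ofList xs x).mp hx
      have hle := PySem.Set.length_ofList_le xs
      constructor
      · intro h; simp at h; omega
      · intro h
        rw [List.nodup_append] at h
        exact (h.2.2 x hm x (by simp) rfl).elim
    · rw [if_neg hx]
      have hm : x ∉ xs := fun hh => hx ((PySem.Set.mem_ofList xs x).mpr hh)
      constructor
      · intro h
        rw [List.nodup_append]
        refine ⟨?_, by simp, ?_⟩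
        · exact ih.mp (by simpa using h)
        · intro a ha b hb; rw [List.mem_singleton] at hb; subst hb; rintro rfl; exact hm ha
      · intro h
        rw [List.nodup_append] at h
        simp [ih.mpr h.1]

lemma equal_ofList_iff {c c' : List String} (h1 : c.Nodup) (h2 : c'.Nodup) :
    PySem.Set.equal (PySem.Set.ofList c) (PySem.Set.ofList c') = true ↔
      PySem.List.sorted c (fun x => x) = PySem.List.sorted c' (fun x => x) := by
  rw [PySem.Set.equal_iff, PySem.List.sorted_id_eq_sorted_id_iff_perm,
    List.perm_ext_iff_of_nodup h1 h2]
  constructor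
  · intro h a; rw [← PySem.Set.mem_ofList, h, PySem.Set.mem_ofList]
  · intro h a; rw [PySem.Set.mem_ofList, PySem.Set.mem_ofList]; exact h a

lemma idLength_eq (user_id : List String) : solIdLength user_id = altIdLength user_id := by
  unfold solIdLength altIdLength
  apply PySem.List.foldl_congr_mem
  intro d u _
  by_cases hc : d.contains (u.toList.length : Int) = false
  · rw [if_pos hc]
    unfold PySem.Dict.modify
    rw [PySem.Dict.getD_of_not_contains d [] hc]
    simp
  · rw [if_neg hc]

lemma altIdLength_len (user_id : List String) :
    ∀ k l, (altIdLength user_id).get? k = some l → ∀ c ∈ l, (c.toList.length : Int) = k := by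
  unfold altIdLength
  suffices h : ∀ (d : PySem.Dict Int (List String)),
      (∀ k l, d.get? k = some l → ∀ c ∈ l, (c.toList.length : Int) = k) →
      ∀ k l, (user_id.foldl (fun d u => d.modify (u.toList.length : Int) [] (fun l => l ++ [u])) d).get? k = some l →
        ∀ c ∈ l, (c.toList.length : Int) = k by
    apply h
    intro k l hl
    simp [PySem.Dict.get?_empty] at hl
  induction user_id with
  | nil => intro d hd; simpa using hd
  | cons u us ih =>
    intro d hd
    simp only [List.foldl_cons]
    apply ih
    intro k l hl c hc
    unfold PySem.Dict.modify at hl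
    rw [PySem.Dict.get?_insert] at hl
    split_ifs at hl with hk
    · subst hk
      cases hl
      rcases List.mem_append.mp hc with h' | h'
      · rcases hg : d.get? (u.toList.length : Int) with _ | l₀
        · rw [PySem.Dict.getD_of_get?_eq_none _ _ hg] at h'; simp at h'
        · rw [PySem.Dict.getD_of_get?_eq_some _ _ hg] at h'
          exact hd _ _ hg c h'
      · rw [List.mem_singleton] at h'; subst h'; rfl
    · exact hd _ _ hl c hc

lemma breaker_eq_match {bl cl : List Char} (h : bl.length = cl.length) :
    (decide (solBreaker bl cl = false)) = altMatch bl cl := by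
  have hb : solBreaker bl cl
      = (PySem.List.pyRange 0 (bl.length : Int) 1).any
          (fun i => PySem.List.pyGetD bl i ' ' != PySem.List.pyGetD cl i ' ' &&
                    PySem.List.pyGetD bl i ' ' != '*') := by
    unfold solBreaker
    rw [PySem.List.foldl_if_true_eq]
    simp
  have key : (solBreaker bl cl = false) ↔ (altMatch bl cl = true) := by
    rw [hb, List.any_eq_false]
    unfold altMatch
    rw [List.all_eq_true]
    constructor
    · intro hall pr hpr
      rw [List.mem_iff_getElem] at hpr
      obtain ⟨k, hk, hpr⟩ := hpr
      have hk' : k < bl.length := by simp [List.length_zip, h] at hk; omega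
      have hkc : k < cl.length := by omega
      have := hall (k : Int) (by rw [PySem.List.mem_pyRange_one]; constructor <;> omega)
      rw [PySem.List.pyGetD_natCast, PySem.List.pyGetD_natCast,
        List.getD_eq_getElem bl ' ' hk', List.getD_eq_getElem cl ' ' hkc] at this
      rw [← hpr, List.getElem_zip]
      simp only [Bool.and_eq_true, bne_iff_ne, ne_eq, not_and, not_not] at this
      by_cases hstar : bl[k] = '*'
      · simp [hstar]
      · simp only [Bool.or_eq_true, beq_iff_eq]
        right
        by_cases heq : bl[k] = cl[k]
        · exact heq
        · exact absurd (this heq) hstar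
    · intro hall i hi
      rw [PySem.List.mem_pyRange_one] at hi
      obtain ⟨k, rfl⟩ : ∃ k : Nat, i = (k : Int) := ⟨i.toNat, by omega⟩
      have hk' : k < bl.length := by exact_mod_cast hi.2
      have hkc : k < cl.length := by omega
      have := hall (bl[k], cl[k]) (by
        rw [List.mem_iff_getElem]
        exact ⟨k, by simp [List.length_zip]; omega, by rw [List.getElem_zip]⟩)
      rw [PySem.List.pyGetD_natCast, PySem.List.pyGetD_natCast,
        List.getD_eq_getElem bl ' ' hk', List.getD_eq_getElem cl ' ' hkc]
      simp only [Bool.or_eq_true, beq_iff_eq] at this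
      simp only [Bool.and_eq_true, bne_iff_ne, ne_eq, not_and, not_not]
      intro hne
      rcases this with h1 | h2
      · exact h1
      · exact absurd h2 hne
  cases hA : altMatch bl cl
  · simp only [decide_eq_false_iff_not]
    rw [key, hA]; simp
  · simp only [decide_eq_true_iff]
    rw [key, hA]

lemma cand_eq (user_id banned_id : List String) :
    solCandidates user_id banned_id = altCandidates user_id banned_id := by
  unfold solCandidates altCandidates
  have hstep : ∀ (cands : List (List String)) (b : String), cands ++
      [(((solIdLength user_id).get? (b.toList.length : Int)).getD []).foldl
        (fun temp c => if solBreaker b.toList c.toList = false then temp ++ [c] else temp) []]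
      = cands ++ [(((altIdLength user_id).get? (b.toList.length : Int)).getD []).filter
        (fun c => altMatch b.toList c.toList)] := by
    intro cands b
    congr 1
    rw [idLength_eq]
    rcases hg : (altIdLength user_id).get? (b.toList.length : Int) with _ | l
    · simp
    · simp only [Option.getD_some]
      rw [PySem.List.foldl_append_ite_eq_filter (fun c : String => solBreaker b.toList c.toList = false)]
      rw [List.nil_append]
      congr 1
      apply List.filter_congr
      intro c hc
      have hk := altIdLength_len user_id _ _ hg c hc
      have hlen : b.toList.length = c.toList.length := by exact_mod_cast hk.symm
      exact breaker_eq_match hlen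
  calc banned_id.foldl (fun cands b => cands ++
        [(((solIdLength user_id).get? (b.toList.length : Int)).getD []).foldl
          (fun temp c => if solBreaker b.toList c.toList = false then temp ++ [c] else temp) []]) []
      = banned_id.foldl (fun cands b => cands ++
        [(((altIdLength user_id).get? (b.toList.length : Int)).getD []).filter
          (fun c => altMatch b.toList c.toList)]) [] := by
        apply PySem.List.foldl_congr_mem
        intro acc b _
        exact hstep acc b
    _ = _ := by
        rw [PySem.List.foldl_append_singleton_eq_map
          (fun b : String => (((altIdLength user_id).get? (b.toList.length : Int)).getD []).filter
            (fun c => altMatch b.toList c.toList))]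
        simp

lemma altDfs_eq : ∀ (cls : List (List String)) (chosen : List String)
    (res : PySem.Set (List String)), chosen.Nodup →
    altDfs cls chosen res =
      (recProd cls).foldl
        (fun res t => if (chosen ++ t).Nodup
          then res.add (PySem.List.sorted (chosen ++ t) (fun x => x)) else res) res := by
  intro cls
  induction cls with
  | nil =>
    intro chosen res h
    simp [altDfs, recProd, h]
  | cons pool rest ih =>
    intro chosen res h
    rw [altDfs, recProd]
    rw [List.foldl_flatMap]
    apply PySem.List.foldl_congr_mem
    intro acc c _
    rw [List.foldl_map]
    by_cases hc : c ∈ chosen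
    · rw [if_pos hc]
      have : ∀ (a : PySem.Set (List String)), ∀ t ∈ recProd rest,
          (if (chosen ++ c :: t).Nodup
            then a.add (PySem.List.sorted (chosen ++ c :: t) (fun x => x)) else a) = a := by
        intro a t _
        rw [if_neg]
        intro hn
        rw [List.nodup_append] at hn
        exact hn.2.2 c hc c (by simp) rfl
      rw [PySem.List.foldl_congr_mem _ _ (fun acc _ => acc) _ this, PySem.List.foldl_ignore]
    · rw [if_neg hc]
      have hnd : (chosen ++ [c]).Nodup := by
        rw [List.nodup_append]
        exact ⟨h, List.nodup_singleton c, by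
          intro a ha b hb; rw [List.mem_singleton] at hb; subst hb; rintro rfl; exact hc ha⟩
      rw [ih (chosen ++ [c]) acc hnd]
      apply PySem.List.foldl_congr_mem
      intro a t _
      rw [List.append_assoc]
      rfl

lemma countEq : ∀ (L : List (List String)), (∀ c ∈ L, c.Nodup) →
    ∀ (ans : List (PySem.Set String)) (ss : PySem.Set (List String)),
    ans.length = ss.length →
    (∀ c : List String, c.Nodup →
      ans.any (fun s => PySem.Set.equal s (PySem.Set.ofList c))
        = PySem.Set.contains ss (PySem.List.sorted c (fun x => x))) →
    (L.foldl
      (fun ans c => if ans.any (fun s => PySem.Set.equal s (PySem.Set.ofList c)) = false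
        then ans ++ [PySem.Set.ofList c] else ans) ans).length
    = (L.foldl (fun ss c => PySem.Set.add ss (PySem.List.sorted c (fun x => x))) ss).length := by
  intro L
  induction L with
  | nil => intro _ ans ss hlen _; simpa using hlen
  | cons c L ih =>
    intro hnd ans ss hlen hmem
    have hc : c.Nodup := hnd c (by simp)
    simp only [List.foldl_cons]
    unfold PySem.Set.add
    rw [← hmem c hc]
    rcases hA : ans.any (fun s => PySem.Set.equal s (PySem.Set.ofList c)) with _ | _
    · -- not seen yet: both append
      simp only [Bool.false_eq_true, if_true, if_false]
      apply ih (fun x hx => hnd x (by simp [hx]))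
      · simp [hlen]
      · intro c' hc'
        rw [List.any_append, PySem.Set.contains_eq_listContains]
        rw [hmem c' hc', PySem.Set.contains_eq_listContains]
        simp only [List.any_cons, List.any_nil, Bool.or_false]
        have : PySem.Set.equal (PySem.Set.ofList c) (PySem.Set.ofList c')
            = (PySem.List.sorted c' (fun x => x) == PySem.List.sorted c (fun x => x)) := by
          rcases hE : PySem.Set.equal (PySem.Set.ofList c) (PySem.Set.ofList c') with _ | _
          · symm; rw [beq_eq_false_iff_ne]
            intro hEq
            have := (equal_ofList_iff hc hc').mpr hEq.symm
            rw [hE] at this; exact Bool.false_ne_true this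
          · symm; rw [beq_iff_eq]
            exact ((equal_ofList_iff hc hc').mp hE).symm
        rw [this]
        by_cases hm : (PySem.List.sorted c' fun x => x) ∈ ss
        · simp [hm]
        · simp [hm, Bool.beq_eq_decide_eq]
    · -- already present: both unchanged
      simp only [Bool.true_eq_false, if_true, if_false]
      exact ih (fun x hx => hnd x (by simp [hx])) ans ss hlen hmem

lemma solution_eq_alt (user_id banned_id : List String) :
    solution user_id banned_id = solution_alt user_id banned_id := by
  simp only [solution, solution_alt]
  rw [cand_eq]
  rw [prodFold]
  simp only [List.flatMap_cons, List.flatMap_nil, List.append_nil, List.nil_append]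
  rw [show (fun s : List String => s) = id from rfl, List.map_id]
  have hCL : ∀ c ∈ recProd (altCandidates user_id banned_id), c.length = banned_id.length := by
    intro c hc
    rw [length_mem_recProd hc]
    simp [altCandidates]
  have hstep : ∀ (ans : List (PySem.Set String)), ∀ c ∈ recProd (altCandidates user_id banned_id),
      (if ((PySem.Set.ofList c).length : Int) = (banned_id.length : Int) ∧
          (ans.any fun s => s.equal (PySem.Set.ofList c)) = false
        then ans ++ [PySem.Set.ofList c] else ans)
      = (if c.Nodup
          then (if (ans.any fun s => s.equal (PySem.Set.ofList c)) = false
                then ans ++ [PySem.Set.ofList c] else ans)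
          else ans) := by
    intro ans c hc
    have hlen : (((PySem.Set.ofList c).length : Int) = (banned_id.length : Int)) ↔ c.Nodup := by
      rw [Int.natCast_inj, ← hCL c hc, ofList_length_eq_iff]
    by_cases hn : c.Nodup
    · rw [if_pos hn]
      by_cases ha : (ans.any fun s => s.equal (PySem.Set.ofList c)) = false
      · rw [if_pos ⟨hlen.mpr hn, ha⟩, if_pos ha]
      · rw [if_neg (fun h => ha h.2), if_neg ha]
    · rw [if_neg hn, if_neg (fun h => hn (hlen.mp h.1))]
  rw [PySem.List.foldl_congr_mem _ _ _ _ hstep]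
  rw [PySem.List.foldl_ite_eq_foldl_filter (fun c : List String => c.Nodup)
    (fun ans c => if (ans.any fun s => s.equal (PySem.Set.ofList c)) = false
      then ans ++ [PySem.Set.ofList c] else ans)]
  rw [altDfs_eq _ [] _ List.nodup_nil]
  simp only [List.nil_append]
  rw [PySem.List.foldl_ite_eq_foldl_filter (fun t : List String => t.Nodup)
    (fun (res : PySem.Set (List String)) t => res.add (PySem.List.sorted t (fun x => x)))]
  have main := countEq ((recProd (altCandidates user_id banned_id)).filter
      (fun c => decide c.Nodup))
    (by intro c hc; exact of_decide_eq_true (List.mem_filter.mp hc).2)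
    [] PySem.Set.empty rfl
    (by intro c' _; simp [PySem.Set.empty, PySem.Set.contains])
  exact_mod_cast main

-- ===== VERDICT (by name: the statement is the Claim_ definition above) =====
theorem solution_spec : Claim_equal_solution := by
  intro user_id banned_id _ _
  unfold Spec_solution
  exact solution_eq_alt user_id banned_id
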